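-- pv_equiv track=rewrite | github.com/kts5927/algorithm | 백준/Gold/16926. 배열 돌리기 1/배열 돌리기 1.py | rotate_counterclockwise
-- ===== SOURCE A (Python) =====
-- def rotate_layer(matrix, layer, N, M):
--     top = layer
--     left = layer
--     bottom = N - 1 - layer
--     right = M - 1 - layer
--
--     top_left = matrix[top][left]
--
--     for i in range(left, right):
--         matrix[top][i] = matrix[top][i + 1]
--
--     for i in range(top, bottom):
--         matrix[i][right] = matrix[i + 1][right]
--
--     for i in range(right, left, -1):
--         matrix[bottom][i] = matrix[bottom][i - 1]
--
--     for i in range(bottom, top, -1):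
--         matrix[i][left] = matrix[i - 1][left]
--
--     matrix[top + 1][left] = top_left
--
-- def rotate_counterclockwise(matrix):
--     if not matrix or not matrix[0]:
--         return matrix
--
--     N = len(matrix)
--     M = len(matrix[0])
--
--     layers = min(N, M) // 2
--
--     for layer in range(layers):
--         rotate_layer(matrix, layer, N, M)
--
--     return matrix
-- ===== SOURCE B (Python) =====
-- def rotate_counterclockwise(matrix):
--     if not matrix or not matrix[0]:
--         return matrix
--     N, M = len(matrix), len(matrix[0])
--     for layer in range(min(N, M) // 2):
--         t, l = layer, layer
--         b, r = N - 1 - layer, M - 1 - layer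
--         ring = ([(t, j) for j in range(l, r)]
--                 + [(i, r) for i in range(t, b)]
--                 + [(b, j) for j in range(r, l, -1)]
--                 + [(i, l) for i in range(b, t, -1)])
--         shifted = ring[1:] + ring[:1]
--         vals = [matrix[i][j] for (i, j) in shifted]
--         for (i, j), v in zip(ring, vals):
--             matrix[i][j] = v
--     return matrix
-- ===== Notes on version B (the rewrite author's own statement) =====
-- stated objective: alternative
-- what changed: Replaces A's four per-edge in-place shift loops plus corner patch-up by building each layer's perimeter coordinate ring once, reading all ring values, and writing each cell the old value of its clockwise successor in one pass.
import Mathlib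
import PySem

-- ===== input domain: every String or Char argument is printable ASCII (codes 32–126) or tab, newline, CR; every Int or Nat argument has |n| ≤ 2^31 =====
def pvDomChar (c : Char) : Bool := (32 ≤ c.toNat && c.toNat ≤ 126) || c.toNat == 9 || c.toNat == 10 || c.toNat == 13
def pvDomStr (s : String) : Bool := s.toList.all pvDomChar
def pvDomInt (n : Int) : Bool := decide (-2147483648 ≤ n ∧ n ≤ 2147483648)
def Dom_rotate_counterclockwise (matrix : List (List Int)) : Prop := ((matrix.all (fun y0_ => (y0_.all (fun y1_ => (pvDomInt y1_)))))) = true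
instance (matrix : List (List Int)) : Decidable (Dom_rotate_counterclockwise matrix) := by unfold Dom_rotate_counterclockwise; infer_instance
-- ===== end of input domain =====

-- B replaces A's four per-edge in-place shift loops (plus corner patch-up) by building each
-- layer's perimeter coordinate ring once, reading all ring values, and writing each cell the old
-- value of its clockwise successor in one pass (objective: alternative decomposition, same cost).
-- Both Pythons mutate the argument in place and return it; the equivalence proved here is about
-- the returned value (B performs the same in-place mutation).

-- shared cell primitives: matrix[i][j] read (getD, only used in range) and write (set, no-op out of range)
def getC (m : List (List Int)) (i j : Nat) : Int := (m.getD i []).getD j 0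
def setC (m : List (List Int)) (i j : Nat) (v : Int) : List (List Int) :=
  m.set i ((m.getD i []).set j v)

-- ===== PORT A =====
def rotate_layer (m : List (List Int)) (layer N M : Nat) : List (List Int) :=
  let top := layer
  let left := layer
  let bottom := N - 1 - layer
  let right := M - 1 - layer
  let topLeft := getC m top left
  let m1 := (List.range' left (right - left)).foldl
      (fun acc i => setC acc top i (getC acc top (i + 1))) m
  let m2 := (List.range' top (bottom - top)).foldl
      (fun acc i => setC acc i right (getC acc (i + 1) right)) m1
  let m3 := ((List.range' (left + 1) (right - left)).reverse).foldl
      (fun acc i => setC acc bottom i (getC acc bottom (i - 1))) m2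
  let m4 := ((List.range' (top + 1) (bottom - top)).reverse).foldl
      (fun acc i => setC acc i left (getC acc (i - 1) left)) m3
  setC m4 (top + 1) left topLeft

def rotate_counterclockwise (matrix : List (List Int)) : List (List Int) :=
  if matrix = [] ∨ matrix.headD [] = [] then matrix
  else
    let N := matrix.length
    let M := (matrix.headD []).length
    let layers := (min N M) / 2
    (List.range layers).foldl (fun acc layer => rotate_layer acc layer N M) matrix

-- ===== PORT B =====
def ringCoords (layer N M : Nat) : List (Nat × Nat) :=
  let t := layer
  let l := layer
  let b := N - 1 - layer
  let r := M - 1 - layer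
  (List.range' l (r - l)).map (fun j => (t, j))
    ++ (List.range' t (b - t)).map (fun i => (i, r))
    ++ ((List.range' (l + 1) (r - l)).reverse).map (fun j => (b, j))
    ++ ((List.range' (t + 1) (b - t)).reverse).map (fun i => (i, l))

def rotate_layer_alt (m : List (List Int)) (layer N M : Nat) : List (List Int) :=
  let ring := ringCoords layer N M
  let shifted := ring.drop 1 ++ ring.take 1
  let vals := shifted.map (fun c => getC m c.1 c.2)
  (ring.zip vals).foldl (fun acc cv => setC acc cv.1.1 cv.1.2 cv.2) m

def rotate_counterclockwise_alt (matrix : List (List Int)) : List (List Int) :=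
  if matrix = [] ∨ matrix.headD [] = [] then matrix
  else
    let N := matrix.length
    let M := (matrix.headD []).length
    (List.range ((min N M) / 2)).foldl (fun acc layer => rotate_layer_alt acc layer N M) matrix

-- ===== PRECONDITION & SPEC =====
-- Pre_ excludes exactly the inputs on which the Python A raises IndexError: when at least one
-- layer is rotated (min(N,M)//2 > 0), every row must be at least as long as the first row.
def Pre_rotate_counterclockwise (matrix : List (List Int)) : Prop :=
  (min matrix.length (matrix.headD []).length) / 2 = 0 ∨
    ∀ row ∈ matrix, (matrix.headD []).length ≤ row.length
instance (matrix : List (List Int)) : Decidable (Pre_rotate_counterclockwise matrix) := by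
  unfold Pre_rotate_counterclockwise; infer_instance

def pvWitness_rotate_counterclockwise : List (List Int) := [[1, 2], [3, 4]]

def Spec_rotate_counterclockwise (matrix : List (List Int)) (out : List (List Int)) : Prop := out = rotate_counterclockwise_alt matrix
instance (matrix : List (List Int)) (out : List (List Int)) : Decidable (Spec_rotate_counterclockwise matrix out) := by unfold Spec_rotate_counterclockwise; infer_instance

-- ===== CLAIM (what is proved, stated in full; the proofs are below) =====
def Claim_equal_rotate_counterclockwise : Prop := ∀ (matrix : List (List Int)), Dom_rotate_counterclockwise matrix → Pre_rotate_counterclockwise matrix → Spec_rotate_counterclockwise matrix (rotate_counterclockwise matrix)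

-- ===== LEMMAS AND PROOFS =====

-- batch write of a list of (cell, value) pairs
def wr (m : List (List Int)) (ps : List ((Nat × Nat) × Int)) : List (List Int) :=
  ps.foldl (fun a p => setC a p.1.1 p.1.2 p.2) m

theorem getC_setC_ne {m : List (List Int)} {i j i' j' : Nat} {v : Int}
    (h : (i, j) ≠ (i', j')) : getC (setC m i j v) i' j' = getC m i' j' := by
  unfold getC setC
  by_cases hi : i = i'
  · subst hi
    have hj : j ≠ j' := by intro hj; exact h (by rw [hj])
    by_cases hlen : i < m.length
    · simp [List.getD, List.getElem?_set_self hlen, List.getElem?_set_ne hj]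
    · rw [List.set_eq_of_length_le (by omega)]
  · simp [List.getD, List.getElem?_set_ne hi]

theorem setC_setC_same (m : List (List Int)) (i j : Nat) (v1 v2 : Int) :
    setC (setC m i j v1) i j v2 = setC m i j v2 := by
  unfold setC
  by_cases hlen : i < m.length
  · simp [List.getD, List.getElem?_set_self hlen, List.set_set]
  · have hm : ∀ (R : List Int), m.set i R = m := fun R => List.set_eq_of_length_le (by omega)
    simp [hm]

theorem wr_append (m : List (List Int)) (ps qs : List ((Nat × Nat) × Int)) :
    wr m (ps ++ qs) = wr (wr m ps) qs := List.foldl_append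

theorem getC_wr_not_mem {m : List (List Int)} {ps : List ((Nat × Nat) × Int)} {c : Nat × Nat}
    (h : ∀ p ∈ ps, p.1 ≠ c) : getC (wr m ps) c.1 c.2 = getC m c.1 c.2 := by
  induction ps generalizing m with
  | nil => rfl
  | cons p ps ih =>
    have h1 : p.1 ≠ c := h p (by simp)
    have : getC (setC m p.1.1 p.1.2 p.2) c.1 c.2 = getC m c.1 c.2 :=
      getC_setC_ne (by simpa using h1)
    calc getC (wr (setC m p.1.1 p.1.2 p.2) ps) c.1 c.2
        = getC (setC m p.1.1 p.1.2 p.2) c.1 c.2 := ih (fun q hq => h q (by simp [hq]))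
      _ = getC m c.1 c.2 := this

-- a read-shift loop equals a batch write of values read from the initial matrix,
-- provided no earlier target collides with a later source
theorem loop_to_wr (tgt src : Nat → Nat × Nat) :
    ∀ (is_ : List Nat) (m : List (List Int)),
    List.Pairwise (fun a b => tgt a ≠ src b) is_ →
    is_.foldl (fun acc i => setC acc (tgt i).1 (tgt i).2 (getC acc (src i).1 (src i).2)) m
      = wr m (is_.map (fun i => (tgt i, getC m (src i).1 (src i).2))) := by
  intro is_
  induction is_ with
  | nil => intro m _; rfl
  | cons i is ih =>
    intro m hp
    have hp' := (List.pairwise_cons.mp hp)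
    simp only [List.foldl_cons, List.map_cons]
    rw [ih _ hp'.2]
    have hmap : is.map (fun j => (tgt j, getC (setC m (tgt i).1 (tgt i).2 (getC m (src i).1 (src i).2)) (src j).1 (src j).2))
        = is.map (fun j => (tgt j, getC m (src j).1 (src j).2)) := by
      apply List.map_congr_left
      intro j hj
      have : getC (setC m (tgt i).1 (tgt i).2 (getC m (src i).1 (src i).2)) (src j).1 (src j).2
          = getC m (src j).1 (src j).2 := getC_setC_ne (by
        have := hp'.1 j hj
        simpa using this)
      rw [this]
    rw [hmap]
    rfl

-- adjacent pairs with wrap value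
def adj : List (Nat × Nat) → (Nat × Nat) → List ((Nat × Nat) × (Nat × Nat))
  | [], _ => []
  | [x], w => [(x, w)]
  | x :: y :: xs, w => (x, y) :: adj (y :: xs) w

theorem zip_drop_adj : ∀ (xs : List (Nat × Nat)) (x w : Nat × Nat),
    (x :: xs).zip (xs ++ [w]) = adj (x :: xs) w := by
  intro xs
  induction xs with
  | nil => intro x w; rfl
  | cons y ys ih =>
    intro x w
    simp only [List.cons_append, List.zip_cons_cons, adj]
    rw [← ih y w]

theorem adj_append : ∀ (X : List (Nat × Nat)) (y : Nat × Nat) (Y : List (Nat × Nat)) (w : Nat × Nat),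
    adj (X ++ y :: Y) w = adj X y ++ adj (y :: Y) w := by
  intro X
  induction X with
  | nil => intro y Y w; rfl
  | cons x X ih =>
    intro y Y w
    cases X with
    | nil => rfl
    | cons x' X' =>
      simp only [List.cons_append, adj]
      rw [← List.cons_append, ih y Y w]

theorem rev_range'_cons (a k : Nat) :
    (List.range' a (k + 1)).reverse = (a + k) :: (List.range' a k).reverse := by
  rw [List.range'_concat]
  simp

theorem adj_map_range (f : Nat → Nat × Nat) :
    ∀ (k a : Nat) (w : Nat × Nat),
    adj ((List.range' a (k + 1)).map f) w
      = ((List.range' a k).map (fun i => (f i, f (i + 1)))) ++ [(f (a + k), w)] := by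
  intro k
  induction k with
  | zero => intro a w; simp [List.range'_succ, adj]
  | succ k ih =>
    intro a w
    rw [List.range'_succ, List.map_cons]
    rw [List.range'_succ (s := a + 1), List.map_cons, adj]
    rw [← List.map_cons (f := f), ← List.range'_succ, ih (a + 1) w]
    rw [List.range'_succ (n := k), List.map_cons, List.cons_append]
    have : a + 1 + k = a + (k + 1) := by omega
    rw [this]

theorem adj_map_rev_range (f : Nat → Nat × Nat) :
    ∀ (k a : Nat) (w : Nat × Nat),
    adj (((List.range' a (k + 1)).reverse).map f) w
      = (((List.range' (a + 1) k).reverse).map (fun i => (f i, f (i - 1)))) ++ [(f a, w)] := by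
  intro k
  induction k with
  | zero => intro a w; simp [adj]
  | succ k ih =>
    intro a w
    rw [rev_range'_cons, List.map_cons]
    rw [rev_range'_cons a k, List.map_cons, adj]
    rw [← List.map_cons (f := f), ← rev_range'_cons, ih a w]
    rw [rev_range'_cons (a + 1) k, List.map_cons, List.cons_append]
    have h1 : a + 1 + k = a + (k + 1) := by omega
    have h2 : a + (k + 1) - 1 = a + k := by omega
    rw [h1, h2]

theorem foldl_layers_congr {f g : List (List Int) → Nat → List (List Int)} :
    ∀ (xs : List Nat) (a : List (List Int)),
    (∀ x ∈ xs, ∀ acc, f acc x = g acc x) → xs.foldl f a = xs.foldl g a := by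
  intro xs
  induction xs with
  | nil => intro a _; rfl
  | cons x xs ih =>
    intro a h
    simp only [List.foldl_cons]
    rw [h x (by simp)]
    exact ih _ (fun y hy acc => h y (by simp [hy]) acc)

theorem loop_step (tgt src : Nat → Nat × Nat) (qs : List ((Nat × Nat) × Int))
    (is_ : List Nat) (m : List (List Int))
    (hp : List.Pairwise (fun a b => tgt a ≠ src b) is_)
    (hd : ∀ i ∈ is_, ∀ p ∈ qs, p.1 ≠ src i) :
    is_.foldl (fun acc i => setC acc (tgt i).1 (tgt i).2 (getC acc (src i).1 (src i).2)) (wr m qs)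
      = wr m (qs ++ is_.map (fun i => (tgt i, getC m (src i).1 (src i).2))) := by
  rw [wr_append, loop_to_wr tgt src is_ (wr m qs) hp]
  congr 1
  apply List.map_congr_left
  intro i hi
  exact congrArg (fun v => (tgt i, v)) (getC_wr_not_mem (c := src i) (fun p hp' => hd i hi p hp'))

theorem adj_map_range' (f : Nat → Nat × Nat) (k a : Nat) (w : Nat × Nat) :
    adj (f a :: (List.range' (a + 1) k).map f) w
      = ((List.range' a k).map (fun i => (f i, f (i + 1)))) ++ [(f (a + k), w)] := by
  rw [← List.map_cons (f := f), ← List.range'_succ]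
  exact adj_map_range f k a w

theorem adj_map_rev_range' (f : Nat → Nat × Nat) (k a : Nat) (w : Nat × Nat) :
    adj (f (a + k) :: ((List.range' a k).reverse).map f) w
      = (((List.range' (a + 1) k).reverse).map (fun i => (f i, f (i - 1)))) ++ [(f a, w)] := by
  rw [← List.map_cons (f := f), ← rev_range'_cons]
  exact adj_map_rev_range f k a w

theorem A_wr (m : List (List Int)) (layer db dr N M : Nat)
    (hb : N - 1 - layer = layer + db + 1) (hr : M - 1 - layer = layer + dr + 1) :
    rotate_layer m layer N M = wr m
      (((((List.range' layer (dr + 1)).map (fun i => (((layer, i) : Nat × Nat), getC m layer (i + 1)))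
        ++ (List.range' layer (db + 1)).map (fun i => (((i, layer + dr + 1) : Nat × Nat), getC m (i + 1) (layer + dr + 1))))
        ++ ((List.range' (layer + 1) (dr + 1)).reverse).map (fun i => (((layer + db + 1, i) : Nat × Nat), getC m (layer + db + 1) (i - 1))))
        ++ ((List.range' (layer + 2) db).reverse).map (fun i => (((i, layer) : Nat × Nat), getC m (i - 1) layer)))
        ++ [(((layer + 1, layer) : Nat × Nat), getC m layer layer)]) := by
  simp only [rotate_layer]
  rw [hb, hr]
  have e1 : layer + dr + 1 - layer = dr + 1 := by omega
  have e2 : layer + db + 1 - layer = db + 1 := by omega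
  rw [e1, e2]
  have h1 := loop_step (fun i => ((layer, i) : Nat × Nat)) (fun i => ((layer, i + 1) : Nat × Nat))
      [] (List.range' layer (dr + 1)) m
      (List.Pairwise.imp (fun h => by intro hEq; rw [Prod.mk.injEq] at hEq; omega)
        (List.pairwise_lt_range' (s := layer) (n := dr + 1) 1))
      (by simp)
  have h2 := loop_step (fun i => ((i, layer + dr + 1) : Nat × Nat)) (fun i => ((i + 1, layer + dr + 1) : Nat × Nat))
      ((List.range' layer (dr + 1)).map (fun i => (((layer, i) : Nat × Nat), getC m layer (i + 1)))) (List.range' layer (db + 1)) m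
      (List.Pairwise.imp (fun h => by intro hEq; rw [Prod.mk.injEq] at hEq; omega)
        (List.pairwise_lt_range' (s := layer) (n := db + 1) 1))
      (by
        intro i hi p hp
        have hib := List.mem_range'_1.mp hi
        simp only [List.mem_map] at hp
        obtain ⟨j, hj, rfl⟩ := hp
        have hjb := List.mem_range'_1.mp hj
        intro hEq; rw [Prod.mk.injEq] at hEq; omega)
  have h3 := loop_step (fun i => ((layer + db + 1, i) : Nat × Nat)) (fun i => ((layer + db + 1, i - 1) : Nat × Nat))
      ((List.range' layer (dr + 1)).map (fun i => (((layer, i) : Nat × Nat), getC m layer (i + 1))) ++ (List.range' layer (db + 1)).map (fun i => (((i, layer + dr + 1) : Nat × Nat), getC m (i + 1) (layer + dr + 1)))) ((List.range' (layer + 1) (dr + 1)).reverse) m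
      (List.pairwise_reverse.mpr
        (List.Pairwise.imp (fun h => by intro hEq; rw [Prod.mk.injEq] at hEq; omega)
          (List.pairwise_lt_range' (s := layer + 1) (n := dr + 1) 1)))
      (by
        intro i hi p hp
        rw [List.mem_reverse] at hi
        have hib := List.mem_range'_1.mp hi
        simp only [List.mem_append, List.mem_map] at hp
        rcases hp with ⟨j, hj, rfl⟩ | ⟨j, hj, rfl⟩ <;>
          (have hjb := List.mem_range'_1.mp hj; intro hEq; rw [Prod.mk.injEq] at hEq; omega))
  have h4 := loop_step (fun i => ((i, layer) : Nat × Nat)) (fun i => ((i - 1, layer) : Nat × Nat))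
      (((List.range' layer (dr + 1)).map (fun i => (((layer, i) : Nat × Nat), getC m layer (i + 1))) ++ (List.range' layer (db + 1)).map (fun i => (((i, layer + dr + 1) : Nat × Nat), getC m (i + 1) (layer + dr + 1)))) ++ ((List.range' (layer + 1) (dr + 1)).reverse).map (fun i => (((layer + db + 1, i) : Nat × Nat), getC m (layer + db + 1) (i - 1)))) ((List.range' (layer + 2) db).reverse) m
      (List.pairwise_reverse.mpr
        (List.Pairwise.imp (fun h => by intro hEq; rw [Prod.mk.injEq] at hEq; omega)
          (List.pairwise_lt_range' (s := layer + 2) (n := db) 1)))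
      (by
        intro i hi p hp
        rw [List.mem_reverse] at hi
        have hib := List.mem_range'_1.mp hi
        simp only [List.mem_append, List.mem_map, List.mem_reverse] at hp
        rcases hp with (⟨j, hj, rfl⟩ | ⟨j, hj, rfl⟩) | ⟨j, hj, rfl⟩ <;>
          (have hjb := List.mem_range'_1.mp hj; intro hEq; rw [Prod.mk.injEq] at hEq; omega))
  simp only [wr, List.foldl_nil, List.nil_append] at h1 h2 h3 h4
  rw [h1, h2, h3]
  rw [show List.range' (layer + 1) (db + 1) = (layer + 1) :: List.range' (layer + 2) db from List.range'_succ,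
      List.reverse_cons, List.foldl_append, h4]
  simp only [wr, List.foldl_append, List.foldl_cons, List.foldl_nil, Nat.add_sub_cancel]
  rw [setC_setC_same]

theorem B_wr (m : List (List Int)) (layer db dr N M : Nat)
    (hb : N - 1 - layer = layer + db + 1) (hr : M - 1 - layer = layer + dr + 1) :
    rotate_layer_alt m layer N M = wr m
      (((((List.range' layer (dr + 1)).map (fun i => (((layer, i) : Nat × Nat), getC m layer (i + 1)))
        ++ (List.range' layer (db + 1)).map (fun i => (((i, layer + dr + 1) : Nat × Nat), getC m (i + 1) (layer + dr + 1))))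
        ++ ((List.range' (layer + 1) (dr + 1)).reverse).map (fun i => (((layer + db + 1, i) : Nat × Nat), getC m (layer + db + 1) (i - 1))))
        ++ ((List.range' (layer + 2) db).reverse).map (fun i => (((i, layer) : Nat × Nat), getC m (i - 1) layer)))
        ++ [(((layer + 1, layer) : Nat × Nat), getC m layer layer)]) := by
  simp only [rotate_layer_alt, ringCoords]
  rw [hb, hr]
  have e1 : layer + dr + 1 - layer = dr + 1 := by omega
  have e2 : layer + db + 1 - layer = db + 1 := by omega
  rw [e1, e2]
  have e3 : layer + 1 + dr = layer + dr + 1 := by omega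
  have e4 : layer + 1 + db = layer + db + 1 := by omega
  conv_lhs =>
    rw [show List.range' layer (dr + 1) = layer :: List.range' (layer + 1) dr from List.range'_succ]
    rw [show List.range' layer (db + 1) = layer :: List.range' (layer + 1) db from List.range'_succ]
    rw [rev_range'_cons (layer + 1) dr, rev_range'_cons (layer + 1) db]
    simp only [List.map_cons, List.cons_append, List.append_assoc]
    simp only [List.drop_succ_cons, List.drop_zero, List.take_succ_cons, List.take_zero]
    rw [List.zip_map_right, zip_drop_adj]
    rw [← List.cons_append, adj_append]
    rw [← List.cons_append, adj_append]
    rw [← List.cons_append, adj_append]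
    rw [adj_map_range' (fun j => ((layer, j) : Nat × Nat)) dr layer]
    rw [adj_map_range' (fun i => ((i, layer + dr + 1) : Nat × Nat)) db layer]
    rw [adj_map_rev_range' (fun j => ((layer + db + 1, j) : Nat × Nat)) dr (layer + 1)]
    rw [adj_map_rev_range' (fun i => ((i, layer) : Nat × Nat)) db (layer + 1)]
    simp only [List.map_append, List.map_map, List.map_cons, List.map_nil,
      Function.comp_def, Prod.map_apply, id_eq]
  rw [e3, e4]
  simp only [wr]
  congr 1
  rw [List.range'_concat (s := layer) (n := dr), List.range'_concat (s := layer) (n := db)]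
  rw [show List.range' (layer + 1) (dr + 1) = (layer + 1) :: List.range' (layer + 2) dr from List.range'_succ,
      List.reverse_cons]
  simp only [List.map_append, List.map_cons, List.map_nil, one_mul, Nat.add_sub_cancel,
    List.append_assoc, List.cons_append, List.nil_append]

theorem layer_eq (m : List (List Int)) (layer N M : Nat)
    (hN : 2 * layer + 2 ≤ N) (hM : 2 * layer + 2 ≤ M) :
    rotate_layer m layer N M = rotate_layer_alt m layer N M := by
  obtain ⟨db, hdb⟩ : ∃ d, N - 1 - layer = layer + d + 1 := ⟨N - 2 * layer - 2, by omega⟩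
  obtain ⟨dr, hdr⟩ : ∃ d, M - 1 - layer = layer + d + 1 := ⟨M - 2 * layer - 2, by omega⟩
  rw [A_wr m layer db dr N M hdb hdr, B_wr m layer db dr N M hdb hdr]

-- ===== VERDICT (by name: the statement is the Claim_ definition above) =====
theorem rotate_counterclockwise_spec : Claim_equal_rotate_counterclockwise := by
  intro matrix _ _
  unfold Spec_rotate_counterclockwise rotate_counterclockwise rotate_counterclockwise_alt
  split
  · rfl
  · apply foldl_layers_congr
    intro layer hmem acc
    have hlt : layer < (min matrix.length (matrix.headD []).length) / 2 := List.mem_range.mp hmem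
    have h2 : 2 * layer + 2 ≤ min matrix.length (matrix.headD []).length := by omega
    exact layer_eq acc layer _ _ (by omega) (by omega)
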